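-- pv_equiv track=rewrite | github.com/habdvgbej914/contrarian-analysis | contrarian_analysis_mcp.py | _three_layer_judgment
-- ===== SOURCE A (Python) =====
-- def _three_layer_judgment(fu_yi, qi_state, relations):
--     """
--     Combine three layers per Xiao Ji's method:
--     "扶者吉，抑者凶。生王之时则为有气，死没之时则是无气。
--      若遇合德，虽抑非害。若逢刑克，为凶更重之。"
--     """
--     base = {"support":"positive","suppress":"negative","peer":"neutral",
--             "resource":"positive","pressure":"negative"}.get(fu_yi, "neutral")
--     qi = {"vital":"strong","depleted":"weak","nascent":"moderate"}.get(qi_state, "moderate")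
--     has_harmony = "harmony" in relations
--     has_conflict = any(r in relations for r in ["consumption","opposition","hidden_damage"])
--
--     if base == "positive":
--         if qi == "strong":
--             if has_harmony: return "strongly_favorable"
--             if has_conflict: return "favorable_with_tension"
--             return "favorable"
--         elif qi == "weak":
--             if has_harmony: return "latent_potential"
--             if has_conflict: return "unstable"
--             return "weak_positive"
--         else:
--             return "emerging"
--     elif base == "negative":
--         if qi == "strong":
--             if has_harmony: return "restrained_but_safe"
--             if has_conflict: return "strongly_adverse"
--             return "adverse"
--         elif qi == "weak":
--             if has_harmony: return "dormant"
--             if has_conflict: return "critically_adverse"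
--             return "depleted_negative"
--         else:
--             return "suppressed"
--     else:
--         if qi == "strong": return "stable"
--         elif qi == "weak": return "stagnant"
--         else: return "transitional"
-- ===== SOURCE B (Python) =====
-- # Single pass over relations with a min-priority accumulator; base/qi encoded as
-- # small integers; result picked by arithmetic index into a flat 27-label list.
-- _LABELS = [
--     "strongly_favorable", "favorable_with_tension", "favorable",
--     "latent_potential", "unstable", "weak_positive",
--     "emerging", "emerging", "emerging",
--     "restrained_but_safe", "strongly_adverse", "adverse",
--     "dormant", "critically_adverse", "depleted_negative",
--     "suppressed", "suppressed", "suppressed",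
--     "stable", "stable", "stable",
--     "stagnant", "stagnant", "stagnant",
--     "transitional", "transitional", "transitional",
-- ]
--
--
-- def _three_layer_judgment(fu_yi, qi_state, relations):
--     bi = 0 if fu_yi in ("support", "resource") else 1 if fu_yi in ("suppress", "pressure") else 2
--     qn = 0 if qi_state == "vital" else 1 if qi_state == "depleted" else 2
--     ax = 2
--     for r in relations:
--         p = 0 if r == "harmony" else 1 if r in ("consumption", "opposition", "hidden_damage") else 2
--         if p < ax:
--             ax = p
--     return _LABELS[bi * 9 + qn * 3 + ax]
-- ===== Notes on version B (the rewrite author's own statement) =====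
-- stated objective: alternative
-- what changed: Replaced the two dict lookups, the repeated membership scans of relations and the nested if/elif tree by integer encodings of base and qi, ONE pass over relations keeping a min-priority accumulator for the relation axis, and an arithmetic index bi*9+qn*3+ax into a flat 27-label list.
import Mathlib
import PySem

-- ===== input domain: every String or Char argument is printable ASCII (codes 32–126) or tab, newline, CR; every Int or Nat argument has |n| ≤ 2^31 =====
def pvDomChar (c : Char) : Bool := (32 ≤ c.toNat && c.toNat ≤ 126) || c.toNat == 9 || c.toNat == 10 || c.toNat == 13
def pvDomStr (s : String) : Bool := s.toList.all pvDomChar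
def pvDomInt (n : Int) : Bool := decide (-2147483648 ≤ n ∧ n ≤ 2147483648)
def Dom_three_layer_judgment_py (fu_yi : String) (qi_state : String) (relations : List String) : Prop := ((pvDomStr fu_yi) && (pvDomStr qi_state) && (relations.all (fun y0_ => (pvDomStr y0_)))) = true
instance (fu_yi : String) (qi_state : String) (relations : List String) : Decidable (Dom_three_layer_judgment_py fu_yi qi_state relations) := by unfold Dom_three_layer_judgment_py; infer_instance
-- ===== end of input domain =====

-- B replaces the dict lookups, repeated membership scans and the nested branch tree by integer
-- encodings of base/qi, ONE min-priority pass over relations, and an arithmetic index into a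
-- flat 27-label list (objective: alternative).

-- ===== PORT A =====
-- the two dict literals of the Python source
def pvBaseDict : PySem.Dict String String :=
  PySem.Dict.ofList [("support", "positive"), ("suppress", "negative"), ("peer", "neutral"),
                     ("resource", "positive"), ("pressure", "negative")]

def pvQiDict : PySem.Dict String String :=
  PySem.Dict.ofList [("vital", "strong"), ("depleted", "weak"), ("nascent", "moderate")]

def three_layer_judgment_py (fu_yi : String) (qi_state : String) (relations : List String) : String :=
  let base := PySem.Dict.getD pvBaseDict fu_yi "neutral"
  let qi := PySem.Dict.getD pvQiDict qi_state "moderate"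
  let has_harmony := relations.contains "harmony"
  let has_conflict := (["consumption", "opposition", "hidden_damage"]).any (fun r => relations.contains r)
  if base == "positive" then
    if qi == "strong" then
      if has_harmony then "strongly_favorable"
      else if has_conflict then "favorable_with_tension"
      else "favorable"
    else if qi == "weak" then
      if has_harmony then "latent_potential"
      else if has_conflict then "unstable"
      else "weak_positive"
    else "emerging"
  else if base == "negative" then
    if qi == "strong" then
      if has_harmony then "restrained_but_safe"
      else if has_conflict then "strongly_adverse"
      else "adverse"
    else if qi == "weak" then
      if has_harmony then "dormant"
      else if has_conflict then "critically_adverse"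
      else "depleted_negative"
    else "suppressed"
  else
    if qi == "strong" then "stable"
    else if qi == "weak" then "stagnant"
    else "transitional"

-- ===== PORT B =====
-- Source B's module-level flat label list _LABELS
def pvLabels : List String :=
  ["strongly_favorable", "favorable_with_tension", "favorable",
   "latent_potential", "unstable", "weak_positive",
   "emerging", "emerging", "emerging",
   "restrained_but_safe", "strongly_adverse", "adverse",
   "dormant", "critically_adverse", "depleted_negative",
   "suppressed", "suppressed", "suppressed",
   "stable", "stable", "stable",
   "stagnant", "stagnant", "stagnant",
   "transitional", "transitional", "transitional"]

-- the per-element priority of Source B's loop body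
def pvPrio (r : String) : Nat :=
  if r == "harmony" then 0
  else if r == "consumption" || r == "opposition" || r == "hidden_damage" then 1
  else 2

-- Python's _LABELS[i] would raise IndexError out of range; the index below is always < 27,
-- so the default "" of getD is unreachable.
def three_layer_judgment_py_alt (fu_yi : String) (qi_state : String) (relations : List String) : String :=
  let bi : Nat := if fu_yi == "support" || fu_yi == "resource" then 0
                  else if fu_yi == "suppress" || fu_yi == "pressure" then 1 else 2
  let qn : Nat := if qi_state == "vital" then 0
                  else if qi_state == "depleted" then 1 else 2
  let ax : Nat := relations.foldl (fun acc r => if pvPrio r < acc then pvPrio r else acc) 2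
  pvLabels.getD (bi * 9 + qn * 3 + ax) ""

-- ===== PRECONDITION & SPEC =====
def Spec_three_layer_judgment_py (fu_yi : String) (qi_state : String) (relations : List String) (out : String) : Prop := out = three_layer_judgment_py_alt fu_yi qi_state relations
instance (fu_yi : String) (qi_state : String) (relations : List String) (out : String) : Decidable (Spec_three_layer_judgment_py fu_yi qi_state relations out) := by unfold Spec_three_layer_judgment_py; infer_instance

-- ===== CLAIM (what is proved, stated in full; the proofs are below) =====
def Claim_equal_three_layer_judgment_py : Prop := ∀ (fu_yi : String) (qi_state : String) (relations : List String), Dom_three_layer_judgment_py fu_yi qi_state relations → Spec_three_layer_judgment_py fu_yi qi_state relations (three_layer_judgment_py fu_yi qi_state relations)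

-- ===== LEMMAS AND PROOFS =====
-- All axis reasoning is done over the mapped priorities (Nats), keeping simp away from strings.
def pvAxisP (ps : List Nat) : Nat :=
  if ps.contains 0 then 0 else if ps.contains 1 then 1 else 2

theorem pvAxisP_le (ps : List Nat) : pvAxisP ps ≤ 2 := by
  unfold pvAxisP; split_ifs <;> omega

theorem pvPrio_le (r : String) : pvPrio r ≤ 2 := by
  unfold pvPrio; split_ifs <;> omega

theorem pvPrio_cases (x : String) :
    (pvPrio x = 0 ∧ x = "harmony") ∨
    (pvPrio x = 1 ∧ (x = "consumption" ∨ x = "opposition" ∨ x = "hidden_damage")) ∨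
    (pvPrio x = 2 ∧ x ≠ "harmony" ∧ x ≠ "consumption" ∧ x ≠ "opposition" ∧ x ≠ "hidden_damage") := by
  unfold pvPrio
  split_ifs with h1 h2 <;> simp_all <;> tauto

theorem pvAxisP_cons (p : Nat) (ps : List Nat) (hp : p ≤ 2) :
    pvAxisP (p :: ps) = min p (pvAxisP ps) := by
  interval_cases p <;>
    simp only [pvAxisP, List.contains_cons] <;> simp <;> split_ifs <;> omega

theorem pvFoldP (ps : List Nat) (hps : ∀ p ∈ ps, p ≤ 2) (a : Nat) (ha : a ≤ 2) :
    ps.foldl (fun acc p => if p < acc then p else acc) a = min a (pvAxisP ps) := by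
  induction ps generalizing a with
  | nil => simp [pvAxisP]; omega
  | cons p ps ih =>
    have hp : p ≤ 2 := hps p (by simp)
    have h1 : (if p < a then p else a) = min a p := by split_ifs <;> omega
    simp only [List.foldl_cons, h1]
    rw [ih (fun q hq => hps q (by simp [hq])) (min a p) (by omega), pvAxisP_cons p ps hp]
    have := pvAxisP_le ps
    omega

theorem map_contains0 (l : List String) :
    (l.map pvPrio).contains 0 = l.contains "harmony" := by
  induction l with
  | nil => rfl
  | cons x xs ih =>
    simp only [List.map_cons, List.contains_cons, ih]
    rcases pvPrio_cases x with ⟨hp, rfl⟩ | ⟨hp, rfl | rfl | rfl⟩ | ⟨hp, h1, h2, h3, h4⟩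
    · simp [hp]
    · simp [hp]
    · simp [hp]
    · simp [hp]
    · have e1 : ("harmony" == x) = false := beq_eq_false_iff_ne.mpr (Ne.symm h1)
      simp [hp, e1]

theorem map_contains1 (l : List String) :
    (l.map pvPrio).contains 1 =
      (l.contains "consumption" || l.contains "opposition" || l.contains "hidden_damage") := by
  induction l with
  | nil => rfl
  | cons x xs ih =>
    simp only [List.map_cons, List.contains_cons, ih]
    rcases pvPrio_cases x with ⟨hp, rfl⟩ | ⟨hp, rfl | rfl | rfl⟩ | ⟨hp, h1, h2, h3, h4⟩
    · simp [hp]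
    · simp [hp]
    · simp [hp]
    · simp [hp]
    · have e2 : ("consumption" == x) = false := beq_eq_false_iff_ne.mpr (Ne.symm h2)
      have e3 : ("opposition" == x) = false := beq_eq_false_iff_ne.mpr (Ne.symm h3)
      have e4 : ("hidden_damage" == x) = false := beq_eq_false_iff_ne.mpr (Ne.symm h4)
      simp [hp, e2, e3, e4]

theorem pvFoldl_map_prio (l : List String) (a : Nat) :
    l.foldl (fun acc r => if pvPrio r < acc then pvPrio r else acc) a
      = (l.map pvPrio).foldl (fun acc p => if p < acc then p else acc) a := by
  induction l generalizing a with
  | nil => rfl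
  | cons x xs ih => simp [List.foldl_cons, ih]

theorem pvFold_eq (l : List String) :
    l.foldl (fun acc r => if pvPrio r < acc then pvPrio r else acc) 2 = pvAxisP (l.map pvPrio) := by
  rw [pvFoldl_map_prio]
  rw [pvFoldP _ (by intro p hp
                    rcases List.mem_map.mp hp with ⟨r, _, rfl⟩
                    exact pvPrio_le r) 2 (by omega)]
  have := pvAxisP_le (l.map pvPrio)
  omega

theorem pvBase_link (fu : String) :
    (PySem.Dict.getD pvBaseDict fu "neutral" = "positive" ∧ (fu == "support" || fu == "resource") = true) ∨
    (PySem.Dict.getD pvBaseDict fu "neutral" = "negative" ∧ (fu == "support" || fu == "resource") = false ∧ (fu == "suppress" || fu == "pressure") = true) ∨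
    (PySem.Dict.getD pvBaseDict fu "neutral" = "neutral" ∧ (fu == "support" || fu == "resource") = false ∧ (fu == "suppress" || fu == "pressure") = false) := by
  simp only [pvBaseDict, PySem.Dict.ofList, PySem.Dict.update, List.foldl,
    PySem.Dict.getD_insert, PySem.Dict.getD_empty]
  split_ifs with h1 h2 h3 h4 h5 <;> simp_all

theorem pvQi_link (q : String) :
    (PySem.Dict.getD pvQiDict q "moderate" = "strong" ∧ (q == "vital") = true) ∨
    (PySem.Dict.getD pvQiDict q "moderate" = "weak" ∧ (q == "vital") = false ∧ (q == "depleted") = true) ∨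
    (PySem.Dict.getD pvQiDict q "moderate" = "moderate" ∧ (q == "vital") = false ∧ (q == "depleted") = false) := by
  simp only [pvQiDict, PySem.Dict.ofList, PySem.Dict.update, List.foldl,
    PySem.Dict.getD_insert, PySem.Dict.getD_empty]
  split_ifs with h1 h2 h3 <;> simp_all

-- ===== VERDICT (by name: the statement is the Claim_ definition above) =====
theorem three_layer_judgment_py_spec : Claim_equal_three_layer_judgment_py := by
  intro fu_yi qi_state relations _
  unfold Spec_three_layer_judgment_py three_layer_judgment_py three_layer_judgment_py_alt
  rw [pvFold_eq]
  have hax : pvAxisP (relations.map pvPrio)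
      = (if relations.contains "harmony" then 0
         else if (["consumption", "opposition", "hidden_damage"]).any
                  (fun r => relations.contains r) then (1 : Nat) else 2) := by
    unfold pvAxisP
    rw [map_contains0, map_contains1]
    simp [List.any_cons, or_assoc]
  rw [hax]
  rcases pvBase_link fu_yi with ⟨hb, hb1⟩ | ⟨hb, hb1, hb2⟩ | ⟨hb, hb1, hb2⟩ <;>
  rcases pvQi_link qi_state with ⟨hq, hq1⟩ | ⟨hq, hq1, hq2⟩ | ⟨hq, hq1, hq2⟩ <;>
  cases hH : relations.contains "harmony" <;>
  cases hC : (["consumption", "opposition", "hidden_damage"]).any (fun r => relations.contains r) <;>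
  clear hax <;> simp_all <;> decide
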